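-- pv_equiv track=rewrite | github.com/yustero/csb | programs/landscape_of_epithelial_mesenchymal_paper/Parser.py | network_summary
-- ===== SOURCE A (Python) =====
-- def network_summary(adj):
--     n=len(adj)
--     edges=0
--     pedges=0
--     nedges=0
--     for i in adj:
--         for j in i:
--             if j!=0:
--                 edges+=1
--                 if j==-1:
--                     nedges+=1
--                 elif j==+1:
--                     pedges+=1
--     return(n,edges,pedges,nedges)
-- ===== SOURCE B (Python) =====
-- def network_summary(adj):
--     flat = [v for row in adj for v in row]
--     return (len(adj), len(flat) - flat.count(0), flat.count(1), flat.count(-1))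
-- ===== Notes on version B (the rewrite author's own statement) =====
-- stated objective: idiomatic
-- what changed: Replaces A's nested branch-and-increment loops by flattening the matrix once and reading the three buckets off with list.count (edges = total - count(0), so nonzero-but-not-±1 entries still count as edges).
import Mathlib
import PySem

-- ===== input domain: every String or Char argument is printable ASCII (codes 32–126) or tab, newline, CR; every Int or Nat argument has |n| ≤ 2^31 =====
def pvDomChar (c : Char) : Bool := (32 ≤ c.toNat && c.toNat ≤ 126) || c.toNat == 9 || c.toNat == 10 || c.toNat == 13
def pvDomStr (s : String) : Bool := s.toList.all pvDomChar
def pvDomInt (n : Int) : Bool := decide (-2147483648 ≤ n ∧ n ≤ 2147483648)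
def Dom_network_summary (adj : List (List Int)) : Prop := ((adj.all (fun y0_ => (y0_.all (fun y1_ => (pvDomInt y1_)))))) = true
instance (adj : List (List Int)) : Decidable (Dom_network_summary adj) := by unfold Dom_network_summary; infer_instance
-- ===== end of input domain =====

-- B flattens the matrix once and reads the counts off with list.count instead of A's nested branch-and-increment loops (idiomatic; same cost).


-- ===== PORT A =====
-- inner loop over one row: state (edges, pedges, nedges)
def nsRow (st : Int × Int × Int) (row : List Int) : Int × Int × Int :=
  row.foldl (fun st j =>
    if j ≠ 0 then
      if j = -1 then (st.1 + 1, st.2.1, st.2.2 + 1)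
      else if j = 1 then (st.1 + 1, st.2.1 + 1, st.2.2)
      else (st.1 + 1, st.2.1, st.2.2)
    else st) st

def network_summary (adj : List (List Int)) : Int × Int × Int × Int :=
  let n : Int := adj.length
  let st := adj.foldl nsRow (0, 0, 0)
  (n, st.1, st.2.1, st.2.2)

-- ===== PORT B =====
def network_summary_alt (adj : List (List Int)) : Int × Int × Int × Int :=
  let flat := adj.flatMap (fun row => row)
  ((adj.length : Int),
   (flat.length : Int) - (PySem.List.count flat 0 : Int),
   (PySem.List.count flat 1 : Int),
   (PySem.List.count flat (-1) : Int))

-- ===== PRECONDITION & SPEC =====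
def Spec_network_summary (adj : List (List Int)) (out : Int × Int × Int × Int) : Prop := out = network_summary_alt adj
instance (adj : List (List Int)) (out : Int × Int × Int × Int) : Decidable (Spec_network_summary adj out) := by unfold Spec_network_summary; infer_instance

-- ===== CLAIM (what is proved, stated in full; the proofs are below) =====
def Claim_equal_network_summary : Prop := ∀ (adj : List (List Int)), Dom_network_summary adj → Spec_network_summary adj (network_summary adj)

-- ===== LEMMAS AND PROOFS =====
theorem nsRow_char (row : List Int) (st : Int × Int × Int) :
    nsRow st row = (st.1 + ((row.length : Int) - (row.count 0 : Int)),
                    st.2.1 + (row.count 1 : Int),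
                    st.2.2 + (row.count (-1) : Int)) := by
  induction row generalizing st with
  | nil => simp [nsRow]
  | cons j t ih =>
    simp only [nsRow, List.foldl_cons] at *
    rw [ih]
    by_cases h1 : j = 0
    · subst h1; simp [List.count_cons, Prod.ext_iff] <;> omega
    · by_cases h2 : j = -1
      · subst h2; simp [List.count_cons, Prod.ext_iff] <;> omega
      · by_cases h3 : j = 1
        · subst h3; simp [List.count_cons, Prod.ext_iff] <;> omega
        · simp [h1, h2, h3, List.count_cons, Prod.ext_iff] <;> push_cast <;> omega

theorem ns_fold_char (adj : List (List Int)) (st : Int × Int × Int) :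
    adj.foldl nsRow st =
      (st.1 + (((adj.flatMap (fun r => r)).length : Int) - ((adj.flatMap (fun r => r)).count 0 : Int)),
       st.2.1 + ((adj.flatMap (fun r => r)).count 1 : Int),
       st.2.2 + ((adj.flatMap (fun r => r)).count (-1) : Int)) := by
  induction adj generalizing st with
  | nil => simp
  | cons r t ih =>
    simp only [List.foldl_cons, List.flatMap_cons, List.count_append, List.length_append]
    rw [nsRow_char, ih]
    push_cast; ring_nf

-- ===== VERDICT (by name: the statement is the Claim_ definition above) =====
theorem network_summary_spec : Claim_equal_network_summary := by
  intro adj _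
  show network_summary adj = network_summary_alt adj
  simp only [network_summary, network_summary_alt, PySem.List.count_eq, ns_fold_char]
  simp
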